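-- pv_equiv track=rewrite | github.com/Pythondelopover/organic-happiness | top_reyting.py | reyting
-- ===== SOURCE A (Python) =====
-- def reyting(max_level,username):
--     top = [
--         [100,'Dilshod'],
--         [85,'admin'],
--         [65,'Rustam_user']
--     ]
--     top.append([max_level, username])
--     top = sorted(top)[::-1]
--     s = ''
--     for i in range(3):
--         s += str(top[i][0])+' '+str(top[i][1])+'\n'
--     return s
-- ===== SOURCE B (Python) =====
-- def reyting(max_level, username):
--     # Baseline leaderboard already in descending order; insert the new entry
--     # at its rank with one scan (full [score, name] pair comparison), no sort.
--     top = [[100, 'Dilshod'], [85, 'admin'], [65, 'Rustam_user']]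
--     new = [max_level, username]
--     i = 0
--     while i < len(top) and top[i] > new:
--         i += 1
--     top.insert(i, new)
--     s = ''
--     for e in top[:3]:
--         s += '%d %s\n' % (e[0], e[1])
--     return s
-- ===== Notes on version B (the rewrite author's own statement) =====
-- stated objective: alternative
-- what changed: B keeps the three baseline entries as an already-descending list and inserts the user's [score, name] pair at its rank with one comparison scan (full pair comparison for tie-breaking), instead of appending and running a full sort plus reversal.
import Mathlib
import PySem

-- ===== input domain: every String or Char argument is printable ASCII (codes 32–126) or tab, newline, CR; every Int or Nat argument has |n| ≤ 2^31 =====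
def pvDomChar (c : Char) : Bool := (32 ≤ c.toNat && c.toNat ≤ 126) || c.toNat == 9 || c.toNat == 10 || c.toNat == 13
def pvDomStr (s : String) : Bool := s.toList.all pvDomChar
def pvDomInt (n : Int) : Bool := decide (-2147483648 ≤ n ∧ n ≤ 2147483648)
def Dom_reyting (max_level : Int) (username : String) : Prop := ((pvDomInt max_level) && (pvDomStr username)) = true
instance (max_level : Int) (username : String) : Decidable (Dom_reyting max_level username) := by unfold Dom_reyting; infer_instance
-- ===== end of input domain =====

-- B replaces A's append-then-full-sort-then-reverse by a single insertion pass into the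
-- already-descending baseline list (alternative decomposition; same return value).

-- ===== PORT A =====
def reyting (max_level : Int) (username : String) : String :=
  let top : List (Int × String) :=
    [(100, "Dilshod"), (85, "admin"), (65, "Rustam_user")]
  let top := top ++ [(max_level, username)]
  let top := (PySem.List.slice? (PySem.List.sorted2 top (·.1) (·.2)) none none (-1)).getD []
  (PySem.List.pyRange 0 3 1).foldl
    (fun s i =>
      s ++ PySem.Int.toStr (PySem.List.pyGetD top i (0, "")).1 ++ " "
        ++ (PySem.List.pyGetD top i (0, "")).2 ++ "\n") ""

-- ===== PORT B =====
-- the while/insert scan of Source B, as structural recursion over the descending baseline list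
def insertDescPair (x : Int × String) : List (Int × String) → List (Int × String)
  | [] => [x]
  | h :: t =>
    if x.1 < h.1 ∨ (x.1 = h.1 ∧ x.2 < h.2) then h :: insertDescPair x t
    else x :: h :: t

def reyting_alt (max_level : Int) (username : String) : String :=
  let top := insertDescPair (max_level, username)
    [(100, "Dilshod"), (85, "admin"), (65, "Rustam_user")]
  (top.take 3).foldl (fun s e => s ++ PySem.Int.toStr e.1 ++ " " ++ e.2 ++ "\n") ""

-- ===== PRECONDITION & SPEC =====
def Spec_reyting (max_level : Int) (username : String) (out : String) : Prop := out = reyting_alt max_level username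
instance (max_level : Int) (username : String) (out : String) : Decidable (Spec_reyting max_level username out) := by unfold Spec_reyting; infer_instance

-- ===== CLAIM (what is proved, stated in full; the proofs are below) =====
def Claim_equal_reyting : Prop := ∀ (max_level : Int) (username : String), Dom_reyting max_level username → Spec_reyting max_level username (reyting max_level username)

-- ===== LEMMAS AND PROOFS =====

-- ===== VERDICT (by name: the statement is the Claim_ definition above) =====
theorem reyting_spec : Claim_equal_reyting := by
  intro ml u _
  unfold Spec_reyting reyting reyting_alt
  rcases lt_trichotomy ml 65 with h65 | h65 | h65
  · -- ml < 65 : the new entry ranks last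
    simp [PySem.List.slice?_none_none_neg_one, PySem.List.sorted2, PySem.List.insertBy,
      insertDescPair, PySem.List.pyRange, PySem.List.pyGetD, PySem.List.pyGet?, PySem.List.pyIdx?,
      String.lt_iff_toList_lt, show List.range 3 = [0, 1, 2] from rfl, List.foldl,
      String.append_assoc, h65, show ml < 85 by omega, show ml < 100 by omega]
  · -- ml = 65 : tie with Rustam_user, broken by the name
    by_cases hu : u.toList < ['R', 'u', 's', 't', 'a', 'm', '_', 'u', 's', 'e', 'r'] <;>
      simp [PySem.List.slice?_none_none_neg_one, PySem.List.sorted2, PySem.List.insertBy,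
        insertDescPair, PySem.List.pyRange, PySem.List.pyGetD, PySem.List.pyGet?, PySem.List.pyIdx?,
        String.lt_iff_toList_lt, show List.range 3 = [0, 1, 2] from rfl, List.foldl,
        String.append_assoc, h65, hu]
  rcases lt_trichotomy ml 85 with h85 | h85 | h85
  · -- 65 < ml < 85
    simp [PySem.List.slice?_none_none_neg_one, PySem.List.sorted2, PySem.List.insertBy,
      insertDescPair, PySem.List.pyRange, PySem.List.pyGetD, PySem.List.pyGet?, PySem.List.pyIdx?,
      String.lt_iff_toList_lt, show List.range 3 = [0, 1, 2] from rfl, List.foldl,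
      String.append_assoc, h65, h85, show ¬ ml < 65 by omega, show ¬ ml = 65 by omega,
      show ml < 100 by omega]
  · -- ml = 85 : tie with admin, broken by the name
    by_cases hu : u.toList < ['a', 'd', 'm', 'i', 'n'] <;>
      simp [PySem.List.slice?_none_none_neg_one, PySem.List.sorted2, PySem.List.insertBy,
        insertDescPair, PySem.List.pyRange, PySem.List.pyGetD, PySem.List.pyGet?, PySem.List.pyIdx?,
        String.lt_iff_toList_lt, show List.range 3 = [0, 1, 2] from rfl, List.foldl,
        String.append_assoc, h85, hu]
  rcases lt_trichotomy ml 100 with h100 | h100 | h100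
  · -- 85 < ml < 100
    simp [PySem.List.slice?_none_none_neg_one, PySem.List.sorted2, PySem.List.insertBy,
      insertDescPair, PySem.List.pyRange, PySem.List.pyGetD, PySem.List.pyGet?, PySem.List.pyIdx?,
      String.lt_iff_toList_lt, show List.range 3 = [0, 1, 2] from rfl, List.foldl,
      String.append_assoc, h65, h85, h100, show ¬ ml < 65 by omega, show ¬ ml < 85 by omega,
      show ¬ ml = 65 by omega, show ¬ ml = 85 by omega]
  · -- ml = 100 : tie with Dilshod, broken by the name
    by_cases hu : u.toList < ['D', 'i', 'l', 's', 'h', 'o', 'd'] <;>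
      simp [PySem.List.slice?_none_none_neg_one, PySem.List.sorted2, PySem.List.insertBy,
        insertDescPair, PySem.List.pyRange, PySem.List.pyGetD, PySem.List.pyGet?, PySem.List.pyIdx?,
        String.lt_iff_toList_lt, show List.range 3 = [0, 1, 2] from rfl, List.foldl,
        String.append_assoc, h100, hu]
  · -- 100 < ml : the new entry ranks first
    simp [PySem.List.slice?_none_none_neg_one, PySem.List.sorted2, PySem.List.insertBy,
      insertDescPair, PySem.List.pyRange, PySem.List.pyGetD, PySem.List.pyGet?, PySem.List.pyIdx?,
      String.lt_iff_toList_lt, show List.range 3 = [0, 1, 2] from rfl, List.foldl,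
      String.append_assoc, h65, h85, h100, show ¬ ml < 65 by omega, show ¬ ml < 85 by omega,
      show ¬ ml < 100 by omega, show ¬ ml = 65 by omega, show ¬ ml = 85 by omega,
      show ¬ ml = 100 by omega]
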